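-- pv_equiv track=rewrite | github.com/Nikhil-Gaba/autonomous-vacuum-simulation | Project 1 - Distance to Walls.py | distance_to_wall
-- ===== SOURCE A (Python) =====
-- WALL = "W"
--
-- VACUUMINATOR = "X"
--
-- def find_coordinates(world, character):
--     """This function accepts the world and an object, either the
--     vacuuminator or the wall, and computes the coordinates of the object
--     by the row and column it is in, returning these row and column numbers
--     of the objects as lists in a tuple.
--     """
--     row_numbers = []
--     column_numbers = []
--     # Here we can access each coordinate in the world grid
--     for row in range(len(world)):
--         for column in range(len(world[row])):
--             if character == world[row][column]:
--                 row_numbers.append(row)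
--                 column_numbers.append(column)
--     return row_numbers, column_numbers
--
-- def distance_to_wall(world):
--     """ This function accepts the world (list of lists) as input, and calculates
--     the distance to the nearest wall of the vacuuminator, and returns this
--     shortest distance as integer.
--     """
--     # Firstly, we check if the world input has a wall present (since distance
--     # to the nearest wall cannot be determined if no wall is in the grid)
--     # We know that all inputs have exactly one vacuuminator
--     wall_present = False
--     for row in world:
--         if WALL in row:
--             wall_present = True
--             break
--
--     if not wall_present:
--         return None
--
--     # We obtain the position of the wall and the vacuuminator to find distance
--     wall_position = find_coordinates(world, character=WALL)
--     vacuum_position = find_coordinates(world, character=VACUUMINATOR)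
--
--     # We obtain all row and column numbers for all walls in the world
--     wall_rows = wall_position[0]
--     wall_columns = wall_position[1]
--     # And similarly, we can obtain the row and column number for the vacuum
--     vacuuminator_row = vacuum_position[0][0]
--     vacuuminator_column = vacuum_position[1][0]
--
--     # Now we can find the Manhattan distance of each wall from the vacuuminator
--     # and keep track of each distance
--     distance = []
--     for wall in range(len(wall_rows)):
--         vertical_distance = abs(vacuuminator_row - wall_rows[wall])
--         horizontal_distance = abs(vacuuminator_column - wall_columns[wall])
--         distance.append(horizontal_distance + vertical_distance)
--
--     # We calculate the distance of the nearest wall from the vacuuminator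
--     shortest_distance = min(distance)
--
--     return shortest_distance
-- ===== SOURCE B (Python) =====
-- WALL = "W"
--
-- VACUUMINATOR = "X"
--
-- def distance_to_wall(world):
--     """Ring search: locate the vacuuminator, then grow Manhattan rings d = 0, 1, 2, ...
--     around it, probing only the O(d) grid cells at exact distance d, and return the
--     first d at which a wall is hit (None if the rings are exhausted without one)."""
--     vac = None
--     for r, row in enumerate(world):
--         for c, cell in enumerate(row):
--             if cell == VACUUMINATOR:
--                 vac = (r, c)
--                 break
--         if vac is not None:
--             break
--     if vac is None:
--         return None
--     vr, vc = vac
--     bound = len(world) + max((len(row) for row in world), default=0)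
--     for d in range(bound + 1):
--         for dr in range(-d, d + 1):
--             r = vr + dr
--             if 0 <= r < len(world):
--                 rem = d - abs(dr)
--                 for c in (vc - rem, vc + rem):
--                     if 0 <= c < len(world[r]) and world[r][c] == WALL:
--                         return d
--     return None
-- ===== Notes on version B (the rewrite author's own statement) =====
-- stated objective: alternative
-- what changed: Instead of collecting all wall coordinates and minimising Manhattan distances over them, B locates the vacuuminator and then grows Manhattan rings d = 0,1,2,... around it, probing only the grid cells at exact distance d, returning the first d at which a wall is hit (None if the rings are exhausted).
import Mathlib
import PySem

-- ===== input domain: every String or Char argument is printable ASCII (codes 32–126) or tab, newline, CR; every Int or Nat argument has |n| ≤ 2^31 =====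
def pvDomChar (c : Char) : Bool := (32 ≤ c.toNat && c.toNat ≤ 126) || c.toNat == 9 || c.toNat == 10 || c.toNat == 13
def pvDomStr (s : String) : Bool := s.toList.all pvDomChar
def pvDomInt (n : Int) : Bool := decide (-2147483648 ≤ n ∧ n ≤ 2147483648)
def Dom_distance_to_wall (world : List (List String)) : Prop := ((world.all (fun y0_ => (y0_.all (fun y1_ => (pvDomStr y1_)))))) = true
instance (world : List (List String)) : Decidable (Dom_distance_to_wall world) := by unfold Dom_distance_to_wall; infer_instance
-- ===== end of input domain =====

-- B replaces A's collect-all-walls-then-min with a growing Manhattan-ring search around the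
-- vacuuminator, returning the first ring radius at which a wall is hit: a different algorithm.

-- ===== PORT A =====
def find_coordinates (world : List (List String)) (character : String) : List Int × List Int :=
  (PySem.List.enumerate world 0).foldl (fun acc p =>
    (PySem.List.enumerate p.2 0).foldl (fun acc2 q =>
      if character == q.2 then (acc2.1 ++ [p.1], acc2.2 ++ [q.1]) else acc2) acc) ([], [])

def distance_to_wall (world : List (List String)) : Option Int :=
  let wall_present := world.any (fun row => row.contains "W")
  if wall_present = false then none
  else
    let wall_position := find_coordinates world "W"
    let vacuum_position := find_coordinates world "X"
    let wall_rows := wall_position.1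
    let wall_columns := wall_position.2
    match PySem.List.pyGet? vacuum_position.1 0, PySem.List.pyGet? vacuum_position.2 0 with
    | some vacuuminator_row, some vacuuminator_column =>
      let distance := (PySem.List.pyRange 0 wall_rows.length 1).foldl (fun acc w =>
        acc ++ [|vacuuminator_column - PySem.List.pyGetD wall_columns w 0| +
                |vacuuminator_row - PySem.List.pyGetD wall_rows w 0|]) []
      PySem.List.min? distance (fun x => x)
    | _, _ => none  -- Python raises IndexError here (a wall but no vacuum); excluded by Pre_

-- ===== PORT B =====
-- inner 'for c, cell in enumerate(row): if cell == X: vac = (r, c); break'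
def rowScanX (r : Int) : List (Int × String) → Option (Int × Int)
  | [] => none
  | q :: t => if q.2 == "X" then some (r, q.1) else rowScanX r t

-- outer 'for r, row in enumerate(world): …; if vac is not None: break'
def vacScan : List (Int × List String) → Option (Int × Int)
  | [] => none
  | p :: t => match rowScanX p.1 (PySem.List.enumerate p.2 0) with
    | some v => some v
    | none => vacScan t

-- body of 'for dr in range(-d, d+1): r = vr+dr; if 0 <= r < len: rem = d-abs(dr);
--          for c in (vc-rem, vc+rem): if 0 <= c < len(world[r]) and world[r][c] == WALL: return d'
def probe (world : List (List String)) (vr vc d dr : Int) : Bool :=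
  decide (0 ≤ vr + dr) && decide (vr + dr < (world.length : Int)) &&
  ([vc - (d - |dr|), vc + (d - |dr|)].any (fun c =>
    decide (0 ≤ c) && decide (c < ((PySem.List.pyGetD world (vr + dr) []).length : Int)) &&
    (PySem.List.pyGetD (PySem.List.pyGetD world (vr + dr) []) c "" == "W")))

def checkD (world : List (List String)) (vr vc d : Int) : Bool :=
  (PySem.List.pyRange (-d) (d + 1) 1).any (probe world vr vc d)

-- 'for d in range(bound + 1): … return d' (early return → recursion over the range list)
def searchLoop (world : List (List String)) (vr vc : Int) : List Int → Option Int
  | [] => none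
  | d :: t => if checkD world vr vc d then some d else searchLoop world vr vc t

def distance_to_wall_alt (world : List (List String)) : Option Int :=
  match vacScan (PySem.List.enumerate world 0) with
  | none => none
  | some (vr, vc) =>
    let bound := (world.length : Int) +
      ((PySem.List.max? (world.map (fun row => (row.length : Int))) (fun x => x)).getD 0)
    searchLoop world vr vc (PySem.List.pyRange 0 (bound + 1) 1)

-- ===== PRECONDITION & SPEC =====
-- Pre_ excludes worlds containing a wall 'W' but no vacuum 'X': there Python A raises IndexError.
def Pre_distance_to_wall (world : List (List String)) : Prop :=
  world.any (fun row => row.contains "W") = true → world.any (fun row => row.contains "X") = true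
instance (world : List (List String)) : Decidable (Pre_distance_to_wall world) := by
  unfold Pre_distance_to_wall; infer_instance
def pvWitness_distance_to_wall : List (List String) := [["X", ".", "W"], [".", "W", "."]]
def Spec_distance_to_wall (world : List (List String)) (out : Option Int) : Prop := out = distance_to_wall_alt world
instance (world : List (List String)) (out : Option Int) : Decidable (Spec_distance_to_wall world out) := by unfold Spec_distance_to_wall; infer_instance

-- ===== CLAIM (what is proved, stated in full; the proofs are below) =====
def Claim_equal_distance_to_wall : Prop := ∀ (world : List (List String)), Dom_distance_to_wall world → Pre_distance_to_wall world → Spec_distance_to_wall world (distance_to_wall world)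

-- ===== LEMMAS AND PROOFS =====

-- row-major (row, col) positions of character c
def posPairs (world : List (List String)) (c : String) : List (Int × Int) :=
  (PySem.List.enumerate world 0).flatMap (fun p =>
    ((PySem.List.enumerate p.2 0).filter (fun q => q.2 == c)).map (fun q => (p.1, q.1)))

theorem innerA (c : String) (r : Int) :
    ∀ (l : List (Int × String)) (acc : List Int × List Int),
      l.foldl (fun acc2 q => if c == q.2 then (acc2.1 ++ [r], acc2.2 ++ [q.1]) else acc2) acc
      = (acc.1 ++ ((l.filter (fun q => q.2 == c)).map (fun q => (r, q.1))).map Prod.fst,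
         acc.2 ++ ((l.filter (fun q => q.2 == c)).map (fun q => (r, q.1))).map Prod.snd) := by
  intro l
  induction l with
  | nil => intro acc; simp
  | cons q t ih =>
    intro acc
    rw [List.foldl_cons, ih]
    by_cases h : q.2 = c
    · simp [h]
    · have h' : ¬ c = q.2 := fun hc => h hc.symm
      simp [h, h']

def pp (l : List (Int × List String)) (c : String) : List (Int × Int) :=
  l.flatMap (fun p => ((PySem.List.enumerate p.2 0).filter (fun q => q.2 == c)).map (fun q => (p.1, q.1)))

theorem outerA (c : String) :
    ∀ (l : List (Int × List String)) (acc : List Int × List Int),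
      l.foldl (fun acc p =>
        (PySem.List.enumerate p.2 0).foldl (fun acc2 q =>
          if c == q.2 then (acc2.1 ++ [p.1], acc2.2 ++ [q.1]) else acc2) acc) acc
      = (acc.1 ++ (pp l c).map Prod.fst, acc.2 ++ (pp l c).map Prod.snd) := by
  intro l
  induction l with
  | nil => simp [pp]
  | cons p t ih =>
    intro acc
    rw [List.foldl_cons, innerA c p.1, ih]
    simp [pp, List.flatMap_cons]

theorem fcA (world : List (List String)) (c : String) :
    find_coordinates world c = ((posPairs world c).map Prod.fst, (posPairs world c).map Prod.snd) := by
  unfold find_coordinates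
  rw [outerA c]
  simp [pp, posPairs]

theorem any_iff_posPairs (world : List (List String)) (c : String) :
    world.any (fun row => row.contains c) = true ↔ posPairs world c ≠ [] := by
  rw [List.any_eq_true]
  unfold posPairs
  rw [Ne, List.flatMap_eq_nil_iff]
  push_neg
  constructor
  · rintro ⟨row, hrow, hc⟩
    rw [List.contains_iff_mem] at hc
    obtain ⟨k, hk, hrw⟩ := List.getElem_of_mem hrow
    subst hrw
    obtain ⟨j, hj, hcw⟩ := List.getElem_of_mem hc
    refine ⟨((k : Int), world[k]), ?_, ?_⟩
    · rw [PySem.List.mem_enumerate_iff]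
      exact ⟨k, hk, by simp⟩
    · simp only [ne_eq, List.map_eq_nil_iff, List.filter_eq_nil_iff]
      push_neg
      refine ⟨((j : Int), c), ?_, by simp⟩
      rw [PySem.List.mem_enumerate_iff]
      exact ⟨j, hj, by simp [hcw]⟩
  · rintro ⟨p, hp, hne⟩
    simp only [ne_eq, List.map_eq_nil_iff, List.filter_eq_nil_iff] at hne
    push_neg at hne
    obtain ⟨q, hq, hqc⟩ := hne
    rw [PySem.List.mem_enumerate_iff] at hp hq
    obtain ⟨k, hk, hpk⟩ := hp
    obtain ⟨j, hj, hqj⟩ := hq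
    refine ⟨p.2, by rw [hpk]; simp, ?_⟩
    rw [List.contains_iff_mem]
    have : q.2 = c := by simpa using hqc
    rw [← this, hqj]
    simp

theorem distA_eq (ws : List (Int × Int)) (vr vc : Int) :
    (PySem.List.pyRange 0 ((ws.map Prod.fst).length : Int) 1).foldl (fun acc w =>
      acc ++ [|vc - PySem.List.pyGetD (ws.map Prod.snd) w 0| +
              |vr - PySem.List.pyGetD (ws.map Prod.fst) w 0|]) []
    = ws.map (fun w => |vr - w.1| + |vc - w.2|) := by
  rw [PySem.List.foldl_append_singleton_eq_map]
  simp only [List.nil_append]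
  apply List.ext_getElem
  · simp [PySem.List.length_pyRange_one]
  · intro k h1 h2
    have hk : k < ws.length := by
      simpa [PySem.List.length_pyRange_one] using h1
    simp [PySem.List.getElem_pyRange_one, PySem.List.pyGetD_natCast, hk, add_comm]

-- membership characterization of posPairs
theorem mem_posPairs (world : List (List String)) (ch : String) (p : Int × Int) :
    p ∈ posPairs world ch ↔
      ∃ (i : Nat) (hi : i < world.length) (j : Nat) (hj : j < world[i].length),
        p = ((i : Int), (j : Int)) ∧ world[i][j] = ch := by
  unfold posPairs
  rw [List.mem_flatMap]
  constructor
  · rintro ⟨q, hq, hp⟩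
    rw [PySem.List.mem_enumerate_iff] at hq
    obtain ⟨i, hi, hqi⟩ := hq
    rw [List.mem_map] at hp
    obtain ⟨x, hx, hpx⟩ := hp
    rw [List.mem_filter] at hx
    obtain ⟨hx1, hx2⟩ := hx
    rw [hqi] at hx1
    simp only at hx1
    rw [PySem.List.mem_enumerate_iff] at hx1
    obtain ⟨j, hj, hxj⟩ := hx1
    refine ⟨i, hi, j, hj, ?_, ?_⟩
    · rw [← hpx, hqi, hxj]; simp
    · have := hx2
      rw [hxj] at this
      simpa using this
  · rintro ⟨i, hi, j, hj, hp, hc⟩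
    refine ⟨((i : Int), world[i]), ?_, ?_⟩
    · rw [PySem.List.mem_enumerate_iff]; exact ⟨i, hi, by simp⟩
    · rw [List.mem_map]
      refine ⟨((j : Int), world[i][j]), ?_, ?_⟩
      · rw [List.mem_filter]
        refine ⟨?_, by simp [hc]⟩
        rw [PySem.List.mem_enumerate_iff]
        exact ⟨j, hj, by simp⟩
      · simp [hp]

-- B's vacuum scan is the first X position in row-major order
theorem rowScanX_eq (r : Int) :
    ∀ (l : List (Int × String)),
      rowScanX r l = (((l.filter (fun q => q.2 == "X")).map (fun q => (r, q.1)))).head? := by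
  intro l
  induction l with
  | nil => simp [rowScanX]
  | cons q t ih =>
    by_cases h : q.2 = "X"
    · simp [rowScanX, h]
    · simp [rowScanX, h, ih]

theorem vacScan_eq :
    ∀ (l : List (Int × List String)), vacScan l = (pp l "X").head? := by
  intro l
  induction l with
  | nil => simp [vacScan, pp]
  | cons p t ih =>
    rw [vacScan, rowScanX_eq, ih]
    simp only [pp, List.flatMap_cons, List.head?_append]
    cases h : (((PySem.List.enumerate p.2 0).filter (fun q => q.2 == "X")).map (fun q => (p.1, q.1))).head? <;>
      simp [h, Option.or]

theorem probe_true_iff (world : List (List String)) (vr vc d dr : Int) :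
    probe world vr vc d dr = true ↔
      (0 ≤ vr + dr ∧ vr + dr < (world.length : Int)) ∧
      ∃ c ∈ [vc - (d - |dr|), vc + (d - |dr|)],
        0 ≤ c ∧ c < ((PySem.List.pyGetD world (vr + dr) []).length : Int) ∧
        PySem.List.pyGetD (PySem.List.pyGetD world (vr + dr) []) c "" = "W" := by
  unfold probe
  simp only [Bool.and_eq_true, decide_eq_true_eq, List.any_eq_true, beq_iff_eq]
  constructor
  · rintro ⟨⟨h1, h2⟩, c, hc, ⟨hc1, hc2⟩, hc3⟩
    exact ⟨⟨h1, h2⟩, c, hc, hc1, hc2, hc3⟩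
  · rintro ⟨⟨h1, h2⟩, c, hc, hc1, hc2, hc3⟩
    exact ⟨⟨h1, h2⟩, c, hc, ⟨hc1, hc2⟩, hc3⟩

-- checkD d succeeds iff some wall lies at Manhattan distance exactly d from (vr, vc)
theorem checkD_iff (world : List (List String)) (vr vc d : Int) :
    checkD world vr vc d = true ↔
      ∃ w ∈ posPairs world "W", |vr - w.1| + |vc - w.2| = d := by
  unfold checkD
  rw [List.any_eq_true]
  constructor
  · rintro ⟨dr, hdr, hp⟩
    rw [PySem.List.mem_pyRange_one] at hdr
    rw [probe_true_iff] at hp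
    obtain ⟨⟨hr0, hrlt⟩, c, hcmem, hc0, hclt, hcw⟩ := hp
    have habs : |dr| ≤ d := abs_le.mpr ⟨by omega, by omega⟩
    have hrow : PySem.List.pyGetD world (vr + dr) [] = world[(vr + dr).toNat]'(by omega) :=
      PySem.List.pyGetD_eq_getElem world [] hr0 (by exact_mod_cast hrlt)
    rw [hrow] at hclt hcw
    have hjlt : c.toNat < (world[(vr + dr).toNat]'(by omega)).length := by omega
    rw [PySem.List.pyGetD_eq_getElem _ "" hc0 (by exact_mod_cast hclt)] at hcw
    refine ⟨(vr + dr, c), ?_, ?_⟩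
    · rw [mem_posPairs]
      refine ⟨(vr + dr).toNat, by omega, c.toNat, hjlt, ?_, hcw⟩
      have e1 : ((vr + dr).toNat : Int) = vr + dr := Int.toNat_of_nonneg hr0
      have e2 : (c.toNat : Int) = c := Int.toNat_of_nonneg hc0
      simp [e1, e2]
    · have h1 : vr - (vr + dr) = -dr := by ring
      simp only [h1, abs_neg]
      simp only [List.mem_cons, List.not_mem_nil, or_false] at hcmem
      have hvcc : |vc - c| = d - |dr| := by
        rcases hcmem with hceq | hceq <;> subst hceq
        · rw [show vc - (vc - (d - |dr|)) = d - |dr| by ring]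
          exact abs_of_nonneg (by omega)
        · rw [show vc - (vc + (d - |dr|)) = -(d - |dr|) by ring, abs_neg]
          exact abs_of_nonneg (by omega)
      omega
  · rintro ⟨w, hw, hdist⟩
    rw [mem_posPairs] at hw
    obtain ⟨i, hi, j, hj, hpij, hcell⟩ := hw
    rw [hpij] at hdist
    simp only at hdist
    have h1 : |vr - (i : Int)| ≤ d := by
      rw [← hdist]; exact le_add_of_nonneg_right (abs_nonneg _)
    refine ⟨(i : Int) - vr, ?_, ?_⟩
    · rw [PySem.List.mem_pyRange_one]
      rcases abs_cases (vr - (i : Int)) with ⟨e, _⟩ | ⟨e, _⟩ <;> omega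
    · rw [probe_true_iff]
      have hvi : vr + ((i : Int) - vr) = (i : Int) := by ring
      rw [hvi]
      have hrow : PySem.List.pyGetD world (i : Int) [] = world[i] := by
        rw [PySem.List.pyGetD_natCast, List.getD_eq_getElem _ _ hi]
      refine ⟨⟨by positivity, by exact_mod_cast hi⟩, (j : Int), ?_, by positivity, ?_, ?_⟩
      · have habs1 : |(i : Int) - vr| = |vr - (i : Int)| := abs_sub_comm _ _
        have hrem : d - |(i : Int) - vr| = |vc - (j : Int)| := by
          rw [habs1]; omega
        rw [hrem]
        simp only [List.mem_cons, List.mem_singleton, List.not_mem_nil, or_false]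
        rcases abs_cases (vc - (j : Int)) with ⟨e, _⟩ | ⟨e, _⟩ <;> omega
      · rw [hrow]; exact_mod_cast hj
      · rw [hrow, PySem.List.pyGetD_natCast, List.getD_eq_getElem _ _ hj]
        exact hcell

-- searchLoop is find? over the list of candidate distances
theorem searchLoop_eq_find? (world : List (List String)) (vr vc : Int) :
    ∀ (l : List Int), searchLoop world vr vc l = l.find? (checkD world vr vc) := by
  intro l
  induction l with
  | nil => simp [searchLoop]
  | cons d t ih =>
    rw [searchLoop, List.find?]
    by_cases h : checkD world vr vc d = true
    · simp [h]
    · simp only [Bool.not_eq_true] at h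
      simp [h, ih]

-- find? over an integer range returns the first satisfying element
theorem find?_pyRange_first (p : Int → Bool) (m : Int) :
    ∀ (a n : Int), a ≤ m → m < n → p m = true → (∀ d, a ≤ d → d < m → p d = false) →
      (PySem.List.pyRange a n 1).find? p = some m := by
  have key : ∀ (k : Nat) (a n : Int), (m - a).toNat = k → a ≤ m → m < n → p m = true →
      (∀ d, a ≤ d → d < m → p d = false) → (PySem.List.pyRange a n 1).find? p = some m := by
    intro k
    induction k with
    | zero =>
      intro a n hk h1 h2 hp _
      have ham : a = m := by omega
      subst ham
      rw [PySem.List.pyRange_one_cons h2, List.find?]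
      simp [hp]
    | succ k ih =>
      intro a n hk h1 h2 hp hb
      rw [PySem.List.pyRange_one_cons (by omega), List.find?]
      have hpa : p a = false := hb a le_rfl (by omega)
      simp only [hpa]
      exact ih (a + 1) n (by omega) (by omega) h2 hp (fun d hd1 hd2 => hb d (by omega) hd2)
  intro a n h1 h2 hp hb
  exact key (m - a).toNat a n rfl h1 h2 hp hb

-- ===== VERDICT (by name: the statement is the Claim_ definition above) =====
theorem distance_to_wall_spec : Claim_equal_distance_to_wall := by
  intro world hdom hpre
  unfold Spec_distance_to_wall distance_to_wall distance_to_wall_alt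
  rw [vacScan_eq]
  have hppX : pp (PySem.List.enumerate world 0) "X" = posPairs world "X" := rfl
  rw [hppX]
  by_cases hw : world.any (fun row => row.contains "W") = true
  · -- a wall exists
    have hW : posPairs world "W" ≠ [] := (any_iff_posPairs world "W").mp hw
    have hX : posPairs world "X" ≠ [] := (any_iff_posPairs world "X").mp (hpre hw)
    obtain ⟨v, t, hXv⟩ := List.exists_cons_of_ne_nil hX
    rw [fcA world "W", fcA world "X"]
    simp only [hw, hXv, List.map_cons, PySem.List.pyGet?_zero_cons, List.head?_cons,
      Bool.true_eq_false, if_false]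
    rw [distA_eq]
    set walls := posPairs world "W" with hwalls
    set dists := walls.map (fun w => |v.1 - w.1| + |v.2 - w.2|) with hdists
    have hdne : dists ≠ [] := by
      simp only [hdists, ne_eq, List.map_eq_nil_iff]
      exact hW
    cases hmin : PySem.List.min? dists (fun x => x) with
    | none => exact absurd ((PySem.List.min?_eq_none_iff dists _).mp hmin) hdne
    | some m =>
      have hmem := PySem.List.min?_mem hmin
      have hisMin := PySem.List.min?_isMin hmin
      obtain ⟨w0, hw0, hw0m⟩ := List.mem_map.mp hmem
      have hv := List.mem_of_mem_head? (by rw [hXv]; rfl : (posPairs world "X").head? = some v)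
      rw [mem_posPairs] at hv
      obtain ⟨iv, hiv, jv, hjv, hveq, _⟩ := hv
      have hw0' := hw0
      rw [hwalls, mem_posPairs] at hw0'
      obtain ⟨i0, hi0, j0, hj0, hw0eq, _⟩ := hw0'
      set M := ((PySem.List.max? (world.map (fun row => (row.length : Int))) (fun x => x)).getD 0) with hM
      have hrowle : ∀ (k : Nat), k < world.length → ∀ (hk : k < world.length), ((world[k].length : Int)) ≤ M := by
        intro k _ hk
        cases hmax : PySem.List.max? (world.map (fun row => (row.length : Int))) (fun x => x) with
        | none =>
          have hnil : world.map (fun row => (row.length : Int)) = [] :=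
            (PySem.List.max?_eq_none_iff _ _).mp hmax
          simp only [List.map_eq_nil_iff] at hnil
          subst hnil
          simp at hk
        | some mx =>
          have hle := PySem.List.max?_isMax hmax ((world[k].length : Int))
            (List.mem_map.mpr ⟨world[k], by simp, rfl⟩)
          rw [hM, hmax]
          simpa using hle
      have hbm : 0 ≤ m ∧ m < (world.length : Int) + M + 1 := by
        rw [← hw0m, hveq, hw0eq]
        simp only
        have h1 := hrowle iv hiv hiv
        have h2 := hrowle i0 hi0 hi0
        have hjv' : (jv : Int) < (world[iv].length : Int) := by exact_mod_cast hjv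
        have hj0' : (j0 : Int) < (world[i0].length : Int) := by exact_mod_cast hj0
        have hiv' : (iv : Int) < (world.length : Int) := by exact_mod_cast hiv
        have hi0' : (i0 : Int) < (world.length : Int) := by exact_mod_cast hi0
        constructor
        · positivity
        · rcases abs_cases ((iv : Int) - (i0 : Int)) with ⟨e1, _⟩ | ⟨e1, _⟩ <;>
          rcases abs_cases ((jv : Int) - (j0 : Int)) with ⟨e2, _⟩ | ⟨e2, _⟩ <;> omega
      rw [searchLoop_eq_find?]
      rw [find?_pyRange_first (checkD world v.1 v.2) m 0 _ hbm.1 hbm.2 ?_ ?_]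
      · rw [checkD_iff]
        exact ⟨w0, hw0, hw0m⟩
      · intro d hd0 hdm
        cases hck : checkD world v.1 v.2 d with
        | false => rfl
        | true =>
          rw [checkD_iff] at hck
          obtain ⟨w1, hw1, hw1d⟩ := hck
          have hmd : m ≤ d := by
            have := hisMin (|v.1 - w1.1| + |v.2 - w1.2|)
              (List.mem_map.mpr ⟨w1, hw1, rfl⟩)
            simpa [hw1d] using this
          omega
  · -- no wall: A returns none; B's ring search never fires
    simp only [Bool.not_eq_true] at hw
    have hWnil : posPairs world "W" = [] := by
      by_contra h
      exact absurd ((any_iff_posPairs world "W").mpr h) (by rw [hw]; exact Bool.false_ne_true)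
    rw [if_pos hw]
    cases hvac : (posPairs world "X").head? with
    | none => rfl
    | some v =>
      obtain ⟨vr, vc⟩ := v
      simp only
      rw [searchLoop_eq_find?]
      refine Eq.symm (List.find?_eq_none.mpr ?_)
      intro d _ hck
      rw [checkD_iff] at hck
      obtain ⟨w1, hw1, _⟩ := hck
      rw [hWnil] at hw1
      exact absurd hw1 (List.not_mem_nil)
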